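-- pv_equiv track=rewrite | github.com/Pranubot/ROT-Cipher-Decrpytion-With-GPT | rot_decoder.py | generate_rot_variations
-- ===== SOURCE A (Python) =====
-- from typing import List, Tuple
--
-- def generate_rot_variations(text: str) -> List[Tuple[int, str]]:
--     # Variations will hold all ROT variations
--     variations = []
--
--     # Generate all possible rotations (1-25)
--     for rotation in range(1, 26):
--         decrypted_text = ""
--
--         # Process each character in the input text
--         for char in text:
--             if char.isalpha():
--                 # Convert to unicode value
--                 char_code = ord(char.upper()) - ord('A')
--                 # Apply rotation and wrap around using mod div
--                 new_code = (char_code - rotation) % 26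
--                 # Convert back to letter
--                 new_char = chr(new_code + ord('A'))
--                 decrypted_text += new_char
--             else:
--                 # Keep non-letters unchanged
--                 decrypted_text += char
--
--         # add variation to results
--         variations.append((rotation, decrypted_text))
--
--     return variations
-- ===== SOURCE B (Python) =====
-- from typing import List, Tuple
--
-- def _shift_back_one(char: str) -> str:
--     if char.isalpha():
--         return chr((ord(char.upper()) - ord('A') - 1) % 26 + ord('A'))
--     return char
--
-- def generate_rot_variations(text: str) -> List[Tuple[int, str]]:
--     # Derive each rotation incrementally: rotation r is the previous
--     # variation shifted back by one more letter.
--     current = "".join(_shift_back_one(c) for c in text)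
--     variations = [(1, current)]
--     for rotation in range(2, 26):
--         current = "".join(_shift_back_one(c) for c in current)
--         variations.append((rotation, current))
--     return variations
-- ===== Notes on version B (the rewrite author's own statement) =====
-- stated objective: alternative
-- what changed: B computes rotation 1 once from the text and then derives each further variation incrementally by shifting every letter of the previous variation back one place (mod 26), instead of recomputing every rotation independently from the original text.
import Mathlib
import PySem

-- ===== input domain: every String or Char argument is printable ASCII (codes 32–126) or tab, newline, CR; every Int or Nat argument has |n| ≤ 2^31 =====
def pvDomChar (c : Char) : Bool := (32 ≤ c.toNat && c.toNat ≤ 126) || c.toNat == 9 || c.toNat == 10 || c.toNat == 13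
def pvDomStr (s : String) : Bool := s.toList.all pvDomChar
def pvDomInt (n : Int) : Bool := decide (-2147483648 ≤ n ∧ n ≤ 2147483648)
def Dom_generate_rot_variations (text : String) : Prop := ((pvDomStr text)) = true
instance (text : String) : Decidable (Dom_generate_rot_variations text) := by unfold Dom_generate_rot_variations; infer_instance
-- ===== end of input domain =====

-- B derives each rotation incrementally from the previous variation (shift-by-one per step)
-- instead of recomputing every rotation from the original text: a different decomposition,
-- same cost class; return values proved equal on all inputs.

-- ===== PORT A =====
-- chr(new_code + 65) is exact here: new_code + 65 always lies in 65..90, a valid code point.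
def generate_rot_variations (text : String) : List (Int × String) :=
  (PySem.List.pyRange 1 26 1).foldl (fun variations rotation =>
    let decrypted_text : List Char :=
      text.toList.foldl (fun acc char =>
        if PySem.Chars.isalpha char then
          let char_code : Int := ((PySem.Chars.upperChar char).toNat : Int) - 65
          let new_code : Int := PySem.Int.mod (char_code - rotation) 26
          let new_char : Char := Char.ofNat (new_code + 65).toNat
          acc ++ [new_char]
        else acc ++ [char]) []
    variations ++ [(rotation, String.ofList decrypted_text)]) []

-- ===== PORT B =====
def pvShiftBackOne (char : Char) : Char :=
  if PySem.Chars.isalpha char then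
    Char.ofNat (PySem.Int.mod (((PySem.Chars.upperChar char).toNat : Int) - 65 - 1) 26 + 65).toNat
  else char

def generate_rot_variations_alt (text : String) : List (Int × String) :=
  let first := String.ofList (text.toList.map pvShiftBackOne)
  ((PySem.List.pyRange 2 26 1).foldl
    (fun (st : List (Int × String) × String) rotation =>
      let next := String.ofList (st.2.toList.map pvShiftBackOne)
      (st.1 ++ [(rotation, next)], next))
    ([(1, first)], first)).1

-- ===== PRECONDITION & SPEC =====
def Spec_generate_rot_variations (text : String) (out : List (Int × String)) : Prop := out = generate_rot_variations_alt text
instance (text : String) (out : List (Int × String)) : Decidable (Spec_generate_rot_variations text out) := by unfold Spec_generate_rot_variations; infer_instance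

-- ===== CLAIM (what is proved, stated in full; the proofs are below) =====
def Claim_equal_generate_rot_variations : Prop := ∀ (text : String), Dom_generate_rot_variations text → Spec_generate_rot_variations text (generate_rot_variations text)

-- ===== LEMMAS AND PROOFS =====

-- proof-side view of A's per-character transform for a given rotation
def pvRotChar (rotation : Int) (c : Char) : Char :=
  if PySem.Chars.isalpha c then
    Char.ofNat (PySem.Int.mod (((PySem.Chars.upperChar c).toNat : Int) - 65 - rotation) 26 + 65).toNat
  else c

theorem pvShiftBackOne_eq_rot_one (c : Char) : pvShiftBackOne c = pvRotChar 1 c := rfl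

theorem toNat_rotChar_of_alpha (r : Int) (c : Char) (h : PySem.Chars.isalpha c = true) :
    ((pvRotChar r c).toNat : Int) =
      PySem.Int.mod (((PySem.Chars.upperChar c).toNat : Int) - 65 - r) 26 + 65 := by
  have h0 := PySem.Int.mod_nonneg (((PySem.Chars.upperChar c).toNat : Int) - 65 - r) (b := 26) (by omega)
  have h1 := PySem.Int.mod_lt (((PySem.Chars.upperChar c).toNat : Int) - 65 - r) (b := 26) (by omega)
  simp only [pvRotChar, h, if_pos]
  rw [Char.toNat_ofNat, if_pos]
  · omega
  · left; omega

theorem shift_rot (r : Int) (c : Char) : pvShiftBackOne (pvRotChar r c) = pvRotChar (r + 1) c := by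
  by_cases h : PySem.Chars.isalpha c = true
  · have htn := toNat_rotChar_of_alpha r c h
    have h0 := PySem.Int.mod_nonneg (((PySem.Chars.upperChar c).toNat : Int) - 65 - r) (b := 26) (by omega)
    have h1 := PySem.Int.mod_lt (((PySem.Chars.upperChar c).toNat : Int) - 65 - r) (b := 26) (by omega)
    have hvalnat : (pvRotChar r c).val.toNat = (pvRotChar r c).toNat := rfl
    have hup : PySem.Chars.isupper (pvRotChar r c) = true := by
      simp only [PySem.Chars.isupper, Bool.and_eq_true, decide_eq_true_eq, Char.le_def,
        UInt32.le_iff_toNat_le]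
      have hA : ('A').val.toNat = 65 := rfl
      have hZ : ('Z').val.toNat = 90 := rfl
      omega
    have hlow : PySem.Chars.islower (pvRotChar r c) = false := by
      simp only [PySem.Chars.islower, Bool.and_eq_false_iff]
      left
      simp only [decide_eq_false_iff_not, Char.le_def, UInt32.le_iff_toNat_le]
      have ha : ('a').val.toNat = 97 := rfl
      omega
    have halpha : PySem.Chars.isalpha (pvRotChar r c) = true := by
      simp [PySem.Chars.isalpha, hup]
    have hupc : PySem.Chars.upperChar (pvRotChar r c) = pvRotChar r c := by
      simp [PySem.Chars.upperChar, hlow]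
    simp only [pvShiftBackOne, halpha, if_pos, hupc, htn]
    have hsimp : PySem.Int.mod (((PySem.Chars.upperChar c).toNat : Int) - 65 - r) 26 + 65 - 65 - 1
        = PySem.Int.mod (((PySem.Chars.upperChar c).toNat : Int) - 65 - r) 26 - 1 := by ring
    rw [hsimp]
    have hmod : PySem.Int.mod (PySem.Int.mod (((PySem.Chars.upperChar c).toNat : Int) - 65 - r) 26 - 1) 26
        = PySem.Int.mod (((PySem.Chars.upperChar c).toNat : Int) - 65 - (r + 1)) 26 := by
      simp only [PySem.Int.mod_eq_emod_of_pos (show (0:Int) < 26 by norm_num)]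
      omega
    rw [hmod]
    simp [pvRotChar, h]
  · have hf : PySem.Chars.isalpha c = false := by simpa using h
    simp [pvRotChar, pvShiftBackOne, hf]

theorem map_shift_map_rot (cs : List Char) (r : Int) :
    (cs.map (pvRotChar r)).map pvShiftBackOne = cs.map (pvRotChar (r + 1)) := by
  simp [List.map_map, Function.comp, shift_rot]

theorem innerA (r : Int) (cs : List Char) (acc : List Char) :
    cs.foldl (fun acc char =>
        if PySem.Chars.isalpha char then
          let char_code : Int := ((PySem.Chars.upperChar char).toNat : Int) - 65
          let new_code : Int := PySem.Int.mod (char_code - r) 26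
          let new_char : Char := Char.ofNat (new_code + 65).toNat
          acc ++ [new_char]
        else acc ++ [char]) acc = acc ++ cs.map (pvRotChar r) := by
  have hbody : ∀ (ac : List Char) (ch : Char),
      (if PySem.Chars.isalpha ch then
          let char_code : Int := ((PySem.Chars.upperChar ch).toNat : Int) - 65
          let new_code : Int := PySem.Int.mod (char_code - r) 26
          let new_char : Char := Char.ofNat (new_code + 65).toNat
          ac ++ [new_char]
        else ac ++ [ch]) = ac ++ [pvRotChar r ch] := by
    intro ac ch
    unfold pvRotChar
    split <;> rfl
  simp only [hbody]
  exact PySem.List.foldl_append_singleton_eq_map (pvRotChar r) cs acc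

theorem A_char (text : String) :
    generate_rot_variations text =
      (PySem.List.pyRange 1 26 1).map
        (fun r => (r, String.ofList (text.toList.map (pvRotChar r)))) := by
  unfold generate_rot_variations
  have hfun : (fun (variations : List (Int × String)) (rotation : Int) =>
      variations ++ [(rotation, String.ofList (text.toList.foldl (fun acc char =>
        if PySem.Chars.isalpha char then
          let char_code : Int := ((PySem.Chars.upperChar char).toNat : Int) - 65
          let new_code : Int := PySem.Int.mod (char_code - rotation) 26
          let new_char : Char := Char.ofNat (new_code + 65).toNat
          acc ++ [new_char]
        else acc ++ [char]) []))])
      = (fun (variations : List (Int × String)) (rotation : Int) =>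
          variations ++ [(rotation, String.ofList (text.toList.map (pvRotChar rotation)))]) := by
    funext v r
    rw [innerA r text.toList []]
    simp
  rw [hfun, PySem.List.foldl_append_singleton_eq_map
    (fun r => (r, String.ofList (text.toList.map (pvRotChar r)))) _ []]
  simp

theorem loopB (cs : List Char) (n : Nat) :
    ∀ (a : Int), a + n = 26 → 1 ≤ a → ∀ (acc : List (Int × String)),
    ((PySem.List.pyRange a 26 1).foldl
      (fun (st : List (Int × String) × String) rotation =>
        let next := String.ofList (st.2.toList.map pvShiftBackOne)
        (st.1 ++ [(rotation, next)], next))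
      (acc, String.ofList (cs.map (pvRotChar (a - 1)))))
    = (acc ++ (PySem.List.pyRange a 26 1).map
          (fun r => (r, String.ofList (cs.map (pvRotChar r)))),
        String.ofList (cs.map (pvRotChar 25))) := by
  induction n with
  | zero =>
    intro a ha _ acc
    have h26 : a = 26 := by omega
    subst h26
    rw [PySem.List.pyRange_one_eq_nil (by omega)]
    simp
  | succ n ih =>
    intro a ha h1 acc
    have hlt : a < 26 := by omega
    rw [PySem.List.pyRange_one_cons hlt]
    simp only [List.foldl_cons, List.map_cons, String.toList_ofList]
    have hnext : (cs.map (pvRotChar (a - 1))).map pvShiftBackOne = cs.map (pvRotChar a) := by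
      rw [map_shift_map_rot]
      norm_num
    rw [hnext]
    have ha' : (a + 1) - 1 = a := by ring
    have := ih (a + 1) (by omega) (by omega) (acc ++ [(a, String.ofList (cs.map (pvRotChar a)))])
    rw [ha'] at this
    rw [this]
    simp

-- ===== VERDICT (by name: the statement is the Claim_ definition above) =====
theorem generate_rot_variations_spec : Claim_equal_generate_rot_variations := by
  intro text _
  unfold Spec_generate_rot_variations generate_rot_variations_alt
  have hfirst : text.toList.map pvShiftBackOne = text.toList.map (pvRotChar 1) := by
    simp [pvShiftBackOne_eq_rot_one]
  simp only [hfirst]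
  have := loopB text.toList 24 2 (by omega) (by omega)
    [(1, String.ofList (text.toList.map (pvRotChar 1)))]
  norm_num at this
  rw [this, A_char, PySem.List.pyRange_one_cons (by omega : (1:Int) < 26)]
  simp
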